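-- pv_equiv track=rewrite | github.com/umerhere23/DSA | pythonProject2/Main TAsk.py | get_risk_level
-- ===== SOURCE A (Python) =====
-- def get_risk_level(temperature, humidity, wind_speed):
--     temperature_levels = ['low', 'medium', 'high']
--     humidity_levels = ['high', 'medium', 'low']
--     wind_speed_levels = ['low', 'medium', 'high']
--
--     temperature_thresholds = [32, 40]
--     humidity_thresholds = [30, 50]
--     wind_speed_thresholds = [40, 55]
--
--     temperature_risk_level = temperature_levels[sum(temperature > threshold for threshold in temperature_thresholds)]
--     humidity_risk_level = humidity_levels[sum(humidity > threshold for threshold in humidity_thresholds)]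
--     wind_speed_risk_level = wind_speed_levels[sum(wind_speed > threshold for threshold in wind_speed_thresholds)]
--
--     return temperature_risk_level, humidity_risk_level, wind_speed_risk_level
-- ===== SOURCE B (Python) =====
-- def _band(value, lo, hi, labels):
--     if value > hi:
--         return labels[2]
--     elif value > lo:
--         return labels[1]
--     else:
--         return labels[0]
--
-- def get_risk_level(temperature, humidity, wind_speed):
--     return (_band(temperature, 32, 40, ('low', 'medium', 'high')),
--             _band(humidity, 30, 50, ('high', 'medium', 'low')),
--             _band(wind_speed, 40, 55, ('low', 'medium', 'high')))
-- ===== Notes on version B (the rewrite author's own statement) =====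
-- stated objective: idiomatic
-- what changed: Replaced the count-booleans-then-index-into-a-list trick with a small threshold-banding helper using explicit if/elif/else branches per variable.
import Mathlib
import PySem

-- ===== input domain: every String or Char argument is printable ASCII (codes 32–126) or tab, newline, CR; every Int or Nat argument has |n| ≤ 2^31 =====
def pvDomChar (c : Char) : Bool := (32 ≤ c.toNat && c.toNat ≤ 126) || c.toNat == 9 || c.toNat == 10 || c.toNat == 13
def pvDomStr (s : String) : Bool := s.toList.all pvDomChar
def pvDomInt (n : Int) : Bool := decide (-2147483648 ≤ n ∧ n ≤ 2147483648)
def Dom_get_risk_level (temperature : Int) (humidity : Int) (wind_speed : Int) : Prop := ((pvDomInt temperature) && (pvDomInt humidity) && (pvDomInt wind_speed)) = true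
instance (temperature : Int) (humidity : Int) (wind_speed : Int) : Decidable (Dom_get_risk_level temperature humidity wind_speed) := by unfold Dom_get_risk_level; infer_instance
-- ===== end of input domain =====

-- B replaces A's count-booleans-then-index-into-a-list trick with an explicit if/elif/else banding helper (idiomatic, same cost).


-- ===== PORT A =====
-- sum(x > th for th in thresholds): fold adding 1 per satisfied comparison
def pvSumGt (x : Int) (thresholds : List Int) : Int :=
  thresholds.foldl (fun acc th => acc + (if x > th then 1 else 0)) 0

def get_risk_level (temperature : Int) (humidity : Int) (wind_speed : Int) : String × String × String :=
  let temperature_levels := ["low", "medium", "high"]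
  let humidity_levels := ["high", "medium", "low"]
  let wind_speed_levels := ["low", "medium", "high"]
  let temperature_thresholds : List Int := [32, 40]
  let humidity_thresholds : List Int := [30, 50]
  let wind_speed_thresholds : List Int := [40, 55]
  let temperature_risk_level := (PySem.List.pyGet? temperature_levels (pvSumGt temperature temperature_thresholds)).getD ""
  let humidity_risk_level := (PySem.List.pyGet? humidity_levels (pvSumGt humidity humidity_thresholds)).getD ""
  let wind_speed_risk_level := (PySem.List.pyGet? wind_speed_levels (pvSumGt wind_speed wind_speed_thresholds)).getD ""
  (temperature_risk_level, humidity_risk_level, wind_speed_risk_level)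

-- ===== PORT B =====
def pvBand (value lo hi : Int) (labels : String × String × String) : String :=
  if value > hi then labels.2.2
  else if value > lo then labels.2.1
  else labels.1

def get_risk_level_alt (temperature : Int) (humidity : Int) (wind_speed : Int) : String × String × String :=
  (pvBand temperature 32 40 ("low", "medium", "high"),
   pvBand humidity 30 50 ("high", "medium", "low"),
   pvBand wind_speed 40 55 ("low", "medium", "high"))

-- ===== PRECONDITION & SPEC =====
def Spec_get_risk_level (temperature : Int) (humidity : Int) (wind_speed : Int) (out : String × String × String) : Prop := out = get_risk_level_alt temperature humidity wind_speed
instance (temperature : Int) (humidity : Int) (wind_speed : Int) (out : String × String × String) : Decidable (Spec_get_risk_level temperature humidity wind_speed out) := by unfold Spec_get_risk_level; infer_instance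

-- ===== CLAIM (what is proved, stated in full; the proofs are below) =====
def Claim_equal_get_risk_level : Prop := ∀ (temperature : Int) (humidity : Int) (wind_speed : Int), Dom_get_risk_level temperature humidity wind_speed → Spec_get_risk_level temperature humidity wind_speed (get_risk_level temperature humidity wind_speed)

-- ===== LEMMAS AND PROOFS =====
theorem pyGet_sumGt_eq_band (x lo hi : Int) (l0 l1 l2 : String) (h : lo < hi) :
    (PySem.List.pyGet? [l0, l1, l2] (pvSumGt x [lo, hi])).getD "" = pvBand x lo hi (l0, l1, l2) := by
  unfold pvSumGt pvBand
  rcases lt_or_ge hi x with h2 | h2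
  · have h1 : lo < x := lt_trans h h2
    simp [h1, h2, PySem.List.pyGet?, PySem.List.pyIdx?]
  · rcases lt_or_ge lo x with h1 | h1
    · simp [h1, not_lt.mpr h2, PySem.List.pyGet?, PySem.List.pyIdx?]
    · simp [not_lt.mpr h1, not_lt.mpr h2, PySem.List.pyGet?, PySem.List.pyIdx?]

-- ===== VERDICT (by name: the statement is the Claim_ definition above) =====
theorem get_risk_level_spec : Claim_equal_get_risk_level := by
  intro t h w _
  unfold Spec_get_risk_level get_risk_level get_risk_level_alt
  simp only []
  rw [pyGet_sumGt_eq_band t 32 40 _ _ _ (by norm_num),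
      pyGet_sumGt_eq_band h 30 50 _ _ _ (by norm_num),
      pyGet_sumGt_eq_band w 40 55 _ _ _ (by norm_num)]
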